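-- pv_equiv track=rewrite | github.com/mohouhaddou/coordination | app_streamlit.py | _column_slices
-- ===== SOURCE A (Python) =====
-- def _column_slices(header: str):
--     starts = []
--     h = header.rstrip("\n")
--     for i, ch in enumerate(h):
--         if (i == 0 and ch != " ") or (i > 0 and ch != " " and h[i-1] == " "):
--             starts.append(i)
--     ends = starts[1:] + [len(h)]
--     cols = []
--     for s, e in zip(starts, ends):
--         name = h[s:e].strip()
--         if name:
--             cols.append((name, s, e))
--     return cols
-- ===== SOURCE B (Python) =====
-- def _column_slices(header: str):
--     # Two-pointer tokenizer: instead of testing every character for a start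
--     # boundary and zipping starts with shifted ends, consume each non-space
--     # run and its trailing gap with inner loops and emit the column directly.
--     h = header.rstrip("\n")
--     n = len(h)
--     cols = []
--     i = 0
--     while i < n:
--         if h[i] == " ":
--             i += 1
--         else:
--             s = i
--             while i < n and h[i] != " ":
--                 i += 1
--             while i < n and h[i] == " ":
--                 i += 1
--             name = h[s:i].strip()
--             if name:
--                 cols.append((name, s, i))
--     return cols
-- ===== Notes on version B (the rewrite author's own statement) =====
-- stated objective: alternative
-- what changed: A tests every character for a start boundary (prev char is space), collects all starts, then zips them with the shifted list of ends; B is a two-pointer tokenizer: an outer cursor skips spaces, and for each token two inner loops consume the non-space run and its trailing gap, emitting the column directly with no starts/ends lists and no boundary test.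
import Mathlib
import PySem

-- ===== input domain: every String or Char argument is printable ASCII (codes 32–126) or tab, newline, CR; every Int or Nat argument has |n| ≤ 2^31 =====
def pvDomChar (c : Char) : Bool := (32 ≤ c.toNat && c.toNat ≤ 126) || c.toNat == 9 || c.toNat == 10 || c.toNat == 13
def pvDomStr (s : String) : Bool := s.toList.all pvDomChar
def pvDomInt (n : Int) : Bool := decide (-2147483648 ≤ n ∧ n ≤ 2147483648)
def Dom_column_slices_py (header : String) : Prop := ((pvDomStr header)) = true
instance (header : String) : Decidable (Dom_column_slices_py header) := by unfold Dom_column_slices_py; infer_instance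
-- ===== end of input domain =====

-- B replaces A's per-character boundary test + starts/ends zipping by a two-pointer
-- tokenizer (skip spaces, consume each non-space run and its trailing gap, emit the
-- column directly); objective: alternative (same O(n) cost, no intermediate lists).

-- shared helper: exact port of str.rstrip("\n") — drop trailing '\n' characters
-- (PySem has no char-set rstrip; exact, since only the single character '\n' is stripped)
def pvRstripNl (s : String) : List Char :=
  (s.toList.reverse.dropWhile (· == '\n')).reverse

-- ===== PORT A =====
def column_slices_py (header : String) : List (String × Int × Int) :=
  let h := pvRstripNl header
  -- for i, ch in enumerate(h): if (i == 0 and ch != " ") or (i > 0 and ch != " " and h[i-1] == " "): starts.append(i)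
  -- (h[i-1] is only read when i > 0, hence in range; pyGetD's default is never used)
  let starts : List Int := (PySem.List.enumerate h).foldl
    (fun acc p =>
      if (p.1 == 0 && p.2 != ' ') || (decide (0 < p.1) && p.2 != ' ' && PySem.List.pyGetD h (p.1 - 1) ' ' == ' ')
      then acc ++ [p.1] else acc) []
  -- ends = starts[1:] + [len(h)]
  let ends : List Int := starts.drop 1 ++ [PySem.List.len h]
  -- for s, e in zip(starts, ends): name = h[s:e].strip(); if name: cols.append((name, s, e))
  (starts.zip ends).foldl
    (fun cols se =>
      let name := PySem.Chars.strip (PySem.List.slice h (some se.1) (some se.2))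
      if name != [] then cols ++ [(String.ofList name, se.1, se.2)] else cols) []

-- ===== PORT B =====
-- while i < n and h[i] != " ": i += 1   (inner run loop of Source B)
def pvSkipRun (h : List Char) (i : Nat) : Nat :=
  if _hlt : i < h.length then
    if h.getD i ' ' ≠ ' ' then pvSkipRun h (i + 1) else i
  else i
termination_by h.length - i
decreasing_by omega

-- while i < n and h[i] == " ": i += 1   (inner gap loop of Source B)
def pvSkipGap (h : List Char) (i : Nat) : Nat :=
  if _hlt : i < h.length then
    if h.getD i ' ' = ' ' then pvSkipGap h (i + 1) else i
  else i
termination_by h.length - i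
decreasing_by omega

-- the three facts the outer loop's termination needs (cited in decreasing_by)
theorem pvSkipRun_ge (h : List Char) (i : Nat) : i ≤ pvSkipRun h i := by
  unfold pvSkipRun
  split
  · split
    · have := pvSkipRun_ge h (i + 1); omega
    · exact le_refl i
  · exact le_refl i
termination_by h.length - i
decreasing_by omega

theorem pvSkipRun_gt (h : List Char) (i : Nat) (h1 : i < h.length)
    (h2 : h.getD i ' ' ≠ ' ') : i + 1 ≤ pvSkipRun h i := by
  rw [pvSkipRun, dif_pos h1, if_pos h2]
  exact pvSkipRun_ge h (i + 1)

theorem pvSkipGap_ge (h : List Char) (i : Nat) : i ≤ pvSkipGap h i := by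
  unfold pvSkipGap
  split
  · split
    · have := pvSkipGap_ge h (i + 1); omega
    · exact le_refl i
  · exact le_refl i
termination_by h.length - i
decreasing_by omega

-- outer while-loop of Source B
def pvBLoop (h : List Char) (i : Nat) (cols : List (String × Int × Int)) :
    List (String × Int × Int) :=
  if hlt : i < h.length then
    if hsp : h.getD i ' ' = ' ' then pvBLoop h (i + 1) cols
    else
      let e := pvSkipGap h (pvSkipRun h i)
      let name := PySem.Chars.strip (PySem.List.slice h (some (i : Int)) (some (e : Int)))
      pvBLoop h e (if name ≠ [] then cols ++ [(String.ofList name, (i : Int), (e : Int))] else cols)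
  else cols
termination_by h.length - i
decreasing_by
  · omega
  · have h1 : i + 1 ≤ pvSkipRun h i := pvSkipRun_gt h i hlt hsp
    have h2 : pvSkipRun h i ≤ pvSkipGap h (pvSkipRun h i) := pvSkipGap_ge h _
    omega

def column_slices_py_alt (header : String) : List (String × Int × Int) :=
  pvBLoop (pvRstripNl header) 0 []

-- ===== PRECONDITION & SPEC =====
def Spec_column_slices_py (header : String) (out : List (String × Int × Int)) : Prop := out = column_slices_py_alt header
instance (header : String) (out : List (String × Int × Int)) : Decidable (Spec_column_slices_py header out) := by unfold Spec_column_slices_py; infer_instance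

-- ===== CLAIM (what is proved, stated in full; the proofs are below) =====
def Claim_equal_column_slices_py : Prop := ∀ (header : String), Dom_column_slices_py header → Spec_column_slices_py header (column_slices_py header)

-- ===== LEMMAS AND PROOFS =====

-- the start predicate of A, on Nat indices
def pvP (h : List Char) (i : Nat) : Bool :=
  h.getD i ' ' != ' ' && (i == 0 || h.getD (i - 1) ' ' == ' ')

def pvName (h : List Char) (s e : Nat) : List Char :=
  PySem.Chars.strip (List.take (e - s) (List.drop s h))

def pvQ (h : List Char) (se : Nat × Nat) : Bool := pvName h se.1 se.2 != []

def pvF (h : List Char) (se : Nat × Nat) : String × Int × Int :=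
  (String.ofList (pvName h se.1 se.2), (se.1 : Int), (se.2 : Int))

-- the common normal form both ports are reduced to
def pvCols (h : List Char) : List (String × Int × Int) :=
  let S := (List.range h.length).filter (pvP h)
  ((S.zip (S.drop 1 ++ [h.length])).filter (pvQ h)).map (pvF h)

theorem pvA_eq (header : String) :
    column_slices_py header = pvCols (pvRstripNl header) := by
  unfold column_slices_py pvCols
  generalize pvRstripNl header = h
  simp only [PySem.List.foldl_append_if, List.nil_append,
    PySem.List.enumerate_eq_map_pyRange _ ' ', PySem.List.pyRange_one, PySem.List.len]
  simp only [zero_add, Int.sub_zero, Int.toNat_natCast, List.map_map, List.filter_map,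
    ← List.map_drop, Function.comp_def]
  have hpt : ∀ i ∈ List.range h.length,
      ((((i : Int) == 0 && h.getD i ' ' != ' ') ||
        (decide (0 < (i : Int)) && h.getD i ' ' != ' ' && PySem.List.pyGetD h ((i : Int) - 1) ' ' == ' ')) : Bool)
      = pvP h i := by
    intro i _
    cases i with
    | zero => simp [pvP]
    | succ k =>
      have h1 : ((k + 1 : Nat) : Int) - 1 = (k : Int) := by push_cast; ring
      have h2 : (0 : Int) < ((k + 1 : Nat) : Int) := by positivity
      cases hc : h.getD (k + 1) ' ' == ' ' <;> simp [pvP, h1, h2, hc] <;>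
        exact fun hx => absurd hx (by omega)
  simp only [PySem.List.pyGetD_natCast]
  rw [List.filter_congr hpt]
  have hm : (List.map (fun k : Nat => (k : Int)) (List.drop 1 (List.filter (pvP h) (List.range h.length))) ++ [(h.length : Int)])
      = List.map (fun k : Nat => (k : Int)) (List.drop 1 (List.filter (pvP h) (List.range h.length)) ++ [h.length]) := by
    simp
  rw [hm, List.zip_map, List.filter_map, List.map_map]
  have hq : ((fun x : Int × Int => PySem.Chars.strip (PySem.List.slice h (some x.1) (some x.2)) != []) ∘
      Prod.map (fun k : Nat => (k : Int)) (fun k : Nat => (k : Int))) = pvQ h := by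
    funext se
    simp [pvQ, pvName, PySem.List.slice_natCast, Prod.map]
  have hf : ((fun x : Int × Int => (String.ofList (PySem.Chars.strip (PySem.List.slice h (some x.1) (some x.2))), x.1, x.2)) ∘
      Prod.map (fun k : Nat => (k : Int)) (fun k : Nat => (k : Int))) = pvF h := by
    funext se
    simp [pvF, pvName, PySem.List.slice_natCast, Prod.map]
  rw [hq, hf]

-- ---- B side ----

-- remaining postconditions of the two skip loops
theorem pvSkipRun_le (h : List Char) (i : Nat) (hi : i ≤ h.length) :
    pvSkipRun h i ≤ h.length := by
  unfold pvSkipRun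
  split
  · split
    · exact pvSkipRun_le h (i + 1) (by omega)
    · exact hi
  · exact hi
termination_by h.length - i
decreasing_by omega

theorem pvSkipGap_le (h : List Char) (i : Nat) (hi : i ≤ h.length) :
    pvSkipGap h i ≤ h.length := by
  unfold pvSkipGap
  split
  · split
    · exact pvSkipGap_le h (i + 1) (by omega)
    · exact hi
  · exact hi
termination_by h.length - i
decreasing_by omega

theorem pvSkipRun_stop (h : List Char) (i : Nat) :
    h.length ≤ pvSkipRun h i ∨ h.getD (pvSkipRun h i) ' ' = ' ' := by
  unfold pvSkipRun
  split
  · split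
    · exact pvSkipRun_stop h (i + 1)
    · rename_i hx; right; exact not_not.mp hx
  · left; omega
termination_by h.length - i
decreasing_by omega

theorem pvSkipGap_stop (h : List Char) (i : Nat) :
    h.length ≤ pvSkipGap h i ∨ h.getD (pvSkipGap h i) ' ' ≠ ' ' := by
  unfold pvSkipGap
  split
  · split
    · exact pvSkipGap_stop h (i + 1)
    · right; assumption
  · left; omega
termination_by h.length - i
decreasing_by omega

theorem pvSkipRun_mid (h : List Char) (i j : Nat) (h1 : i ≤ j) (h2 : j < pvSkipRun h i) :
    h.getD j ' ' ≠ ' ' := by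
  rw [pvSkipRun] at h2
  split at h2
  · split at h2
    · rcases Nat.eq_or_lt_of_le h1 with rfl | hlt
      · assumption
      · exact pvSkipRun_mid h (i + 1) j (by omega) h2
    · omega
  · omega
termination_by h.length - i
decreasing_by omega

theorem pvSkipGap_mid (h : List Char) (i j : Nat) (h1 : i ≤ j) (h2 : j < pvSkipGap h i) :
    h.getD j ' ' = ' ' := by
  rw [pvSkipGap] at h2
  split at h2
  · split at h2
    · rcases Nat.eq_or_lt_of_le h1 with rfl | hlt
      · assumption
      · exact pvSkipGap_mid h (i + 1) j (by omega) h2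
    · omega
  · omega
termination_by h.length - i
decreasing_by omega

-- the starts of A with index ≥ i
def pvT (h : List Char) (i : Nat) : List Nat :=
  (List.range' i (h.length - i)).filter (pvP h)

theorem pvT_of_ge (h : List Char) (i : Nat) (hi : h.length ≤ i) : pvT h i = [] := by
  unfold pvT
  rw [show h.length - i = 0 by omega]
  rfl

theorem pvT_cons (h : List Char) (i : Nat) (hi : i < h.length) :
    pvT h i = if pvP h i then i :: pvT h (i + 1) else pvT h (i + 1) := by
  unfold pvT
  rw [show h.length - i = (h.length - (i + 1)) + 1 by omega, List.range'_succ, List.filter_cons]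

theorem pvT_congr (h : List Char) (a b : Nat) (hab : a ≤ b) (hb : b ≤ h.length)
    (hno : ∀ j, a ≤ j → j < b → pvP h j = false) : pvT h a = pvT h b := by
  rcases Nat.eq_or_lt_of_le hab with rfl | hlt
  · rfl
  · rw [pvT_cons h a (by omega), if_neg (by simp [hno a le_rfl hlt])]
    exact pvT_congr h (a + 1) b hlt hb (fun j hj1 hj2 => hno j (by omega) hj2)
termination_by b - a
decreasing_by omega

theorem pvBLoop_main (h : List Char) (k : Nat) : ∀ i cols, h.length - i ≤ k →
    (i = 0 ∨ h.length ≤ i ∨ h.getD (i - 1) ' ' = ' ') →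
    pvBLoop h i cols
      = cols ++ (((pvT h i).zip ((pvT h i).drop 1 ++ [h.length])).filter (pvQ h)).map (pvF h) := by
  induction k with
  | zero =>
    intro i cols hk _
    have hge : h.length ≤ i := by omega
    rw [pvBLoop, dif_neg (by omega), pvT_of_ge h i hge]
    simp
  | succ k ih =>
    intro i cols hk hinv
    by_cases hlt : i < h.length
    · by_cases hsp : h.getD i ' ' = ' '
      · rw [pvBLoop, dif_pos hlt, dif_pos hsp,
          ih (i + 1) cols (by omega) (Or.inr (Or.inr (by simpa using hsp)))]
        have hTeq : pvT h i = pvT h (i + 1) := by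
          rw [pvT_cons h i hlt, if_neg (by
            simp [pvP]
            exact fun hx => absurd (by simpa using hsp) hx)]
        rw [hTeq]
      · -- token case
        obtain ⟨r, hr⟩ : ∃ r, pvSkipRun h i = r := ⟨_, rfl⟩
        obtain ⟨e, he⟩ : ∃ e, pvSkipGap h r = e := ⟨_, rfl⟩
        have hir : i + 1 ≤ r := hr ▸ pvSkipRun_gt h i hlt hsp
        have hre : r ≤ e := he ▸ pvSkipGap_ge h r
        have hrn : r ≤ h.length := hr ▸ pvSkipRun_le h i (by omega)
        have hen : e ≤ h.length := he ▸ pvSkipGap_le h r hrn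
        have hPi : pvP h i = true := by
          simp [pvP]
          refine And.intro (by simpa using hsp) ?_
          rcases hinv with h0 | h0 | h0
          · exact Or.inl h0
          · omega
          · exact Or.inr (by simpa using h0)
        have hstep : e < h.length → h.getD e ' ' ≠ ' ' ∧ h.getD (e - 1) ' ' = ' ' ∧ e ≠ 0 := by
          intro hlt2
          have hge : h.getD e ' ' ≠ ' ' := by
            rcases he ▸ pvSkipGap_stop h r with hc | hc
            · omega
            · exact hc
          have hr_lt : r < e := by
            rcases Nat.eq_or_lt_of_le hre with heq | hlt3
            · exfalso
              rcases hr ▸ pvSkipRun_stop h i with hs | hs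
              · omega
              · exact hge (heq ▸ hs)
            · exact hlt3
          refine ⟨hge, ?_, by omega⟩
          exact pvSkipGap_mid h r (e - 1) (by omega) (by rw [he]; omega)
        have hmid : ∀ j, i < j → j < e → pvP h j = false := by
          intro j hj1 hj2
          by_cases hjr : j < r
          · have hj0 : j ≠ 0 := by omega
            have hprev : h.getD (j - 1) ' ' ≠ ' ' :=
              pvSkipRun_mid h i (j - 1) (by omega) (by rw [hr]; omega)
            simp [pvP, hj0]
            intro _
            simpa using hprev
          · have hspj : h.getD j ' ' = ' ' := pvSkipGap_mid h r j (by omega) (by rw [he]; omega)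
            simp [pvP]
            exact fun hx => absurd (by simpa using hspj) hx
        have hTi : pvT h i = i :: pvT h e := by
          rw [pvT_cons h i hlt, if_pos hPi]
          congr 1
          exact pvT_congr h (i + 1) e (by omega) hen (fun j hj1 hj2 => hmid j (by omega) hj2)
        have hinv_e : e = 0 ∨ h.length ≤ e ∨ h.getD (e - 1) ' ' = ' ' := by
          by_cases he2 : e < h.length
          · exact Or.inr (Or.inr (hstep he2).2.1)
          · exact Or.inr (Or.inl (by omega))
        have hname : PySem.Chars.strip (PySem.List.slice h (some (i : Int)) (some (e : Int)))
            = pvName h i e := by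
          simp [pvName, PySem.List.slice_natCast]
        rw [pvBLoop, dif_pos hlt, dif_neg hsp]
        simp only [hr, he, hname]
        rw [ih e _ (by omega) hinv_e, hTi]
        cases hT' : pvT h e with
        | nil =>
          have he_n : e = h.length := by
            by_contra hne
            have hlt2 : e < h.length := by omega
            have hPe : pvP h e = true := by
              obtain ⟨hge, hprev, h0⟩ := hstep hlt2
              simp [pvP]
              exact ⟨by simpa using hge, Or.inr (by simpa using hprev)⟩
            rw [pvT_cons h e hlt2, if_pos hPe] at hT'
            simp at hT'
          subst he_n
          by_cases hq : pvName h i h.length = []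
          · simp [hT', pvQ, hq]
          · simp [hT', pvQ, pvF, hq]
        | cons t T'' =>
          have hlt2 : e < h.length := by
            by_contra hc
            rw [pvT_of_ge h e (by omega)] at hT'
            simp at hT'
          have hPe : pvP h e = true := by
            obtain ⟨hge, hprev, h0⟩ := hstep hlt2
            simp [pvP]
            exact ⟨by simpa using hge, Or.inr (by simpa using hprev)⟩
          have hte : t = e := by
            rw [pvT_cons h e hlt2, if_pos hPe] at hT'
            exact (List.cons.inj hT').1.symm
          subst hte
          by_cases hq : pvName h i t = []
          · simp [List.filter_cons, pvQ, pvF, hq]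
          · simp [List.filter_cons, pvQ, pvF, hq]
    · rw [pvBLoop, dif_neg hlt, pvT_of_ge h i (by omega)]
      simp

theorem pvB_eq (header : String) :
    column_slices_py_alt header = pvCols (pvRstripNl header) := by
  unfold column_slices_py_alt pvCols
  generalize pvRstripNl header = h
  rw [pvBLoop_main h h.length 0 [] (by omega) (Or.inl rfl)]
  have : pvT h 0 = (List.range h.length).filter (pvP h) := by
    unfold pvT
    rw [Nat.sub_zero, ← List.range_eq_range']
  rw [this]
  simp

-- ===== VERDICT (by name: the statement is the Claim_ definition above) =====
theorem column_slices_py_spec : Claim_equal_column_slices_py := by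
  intro header _
  unfold Spec_column_slices_py
  rw [pvA_eq, pvB_eq]
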